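-- pv_equiv track=rewrite | github.com/Knightowl3128/Engineering-Drawing-OCR | main.py | find_collinear_lines
-- ===== SOURCE A (Python) =====
-- def find_collinear_lines(segments): #TODO: Nuke this annd write it better ;(
--     segment_copy = segments.copy()
--     grouped_segments = []
--     num = 0
--     while len(segment_copy) > 0:
--         line_now = segment_copy[0]
--         align = line_now[2]
--         index_now = segments.index(line_now)
--         grouped_segments.append([line_now])
--         segment_copy.remove(line_now)
--         for index, line in enumerate(segments):
--             if index == index_now:
--                 continue
--
--             if line[2] == align:
--                 if align == 'Horizontal' and line[0][1] == line_now[0][1]: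
--                     grouped_segments[num].append(line)
--                     segment_copy.remove(line)
--                 elif align == 'Vertical' and line[0][0] == line_now[0][0]:
--                     grouped_segments[num].append(line)
--                     segment_copy.remove(line)
--         num+=1
--     return grouped_segments
-- ===== SOURCE B (Python) =====
-- def find_collinear_lines(segments):
--     # One pass: group by (orientation, shared coordinate); every segment whose
--     # orientation is neither 'Horizontal' nor 'Vertical' gets its own group.
--     groups = {}
--     for i, seg in enumerate(segments):
--         align = seg[2]
--         if align == 'Horizontal':
--             key = ('H', seg[0][1])
--         elif align == 'Vertical':
--             key = ('V', seg[0][0])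
--         else:
--             key = ('S', i)
--         groups[key] = groups.get(key, []) + [seg]
--     return list(groups.values())
-- ===== Notes on version B (the rewrite author's own statement) =====
-- stated objective: faster
-- what changed: Replaced the while-loop that repeatedly rescans the whole segment list and removes matches from a working copy with a single pass that inserts each segment into an insertion-ordered dict keyed by (orientation, shared coordinate), non-axis-aligned segments getting a unique per-index key.
import Mathlib
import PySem

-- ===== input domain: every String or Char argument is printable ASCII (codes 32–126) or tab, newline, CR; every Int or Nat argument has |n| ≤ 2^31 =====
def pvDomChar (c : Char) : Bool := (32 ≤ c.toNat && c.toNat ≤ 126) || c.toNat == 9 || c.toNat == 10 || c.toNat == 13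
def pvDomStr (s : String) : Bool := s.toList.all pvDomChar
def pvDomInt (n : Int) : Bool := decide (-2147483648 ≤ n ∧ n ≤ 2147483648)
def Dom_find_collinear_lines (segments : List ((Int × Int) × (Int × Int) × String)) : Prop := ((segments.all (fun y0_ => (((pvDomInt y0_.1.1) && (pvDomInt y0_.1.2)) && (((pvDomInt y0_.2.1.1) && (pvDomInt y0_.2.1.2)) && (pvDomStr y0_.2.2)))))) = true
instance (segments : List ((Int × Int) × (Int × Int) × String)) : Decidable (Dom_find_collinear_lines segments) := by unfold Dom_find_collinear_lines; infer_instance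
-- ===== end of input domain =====

-- B replaces A's quadratic rescan-and-remove grouping by a single pass over the
-- segments that groups them in an insertion-ordered dict keyed by
-- (orientation, shared coordinate); measured faster (asymptotic change).

abbrev PvSeg : Type := (Int × Int) × (Int × Int) × String

-- ===== PORT A =====
-- Python's segment_copy.remove(v); the ValueError case (v not present) never
-- occurs in A's loop, the total form returns the list unchanged there.
def pvRemove (xs : List PvSeg) (v : PvSeg) : List PvSeg :=
  (PySem.List.remove? xs v).getD xs

-- one step of A's inner 'for index, line in enumerate(segments)' loop
def pvInnerStep (align : String) (lineNow : PvSeg) (indexNow : Int)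
    (st : List PvSeg × List PvSeg) (p : Int × PvSeg) : List PvSeg × List PvSeg :=
  if p.1 == indexNow then st
  else if p.2.2.2 == align then
    (if align == "Horizontal" && p.2.1.2 == lineNow.1.2 then (st.1 ++ [p.2], pvRemove st.2 p.2)
     else if align == "Vertical" && p.2.1.1 == lineNow.1.1 then (st.1 ++ [p.2], pvRemove st.2 p.2)
     else st)
  else st

-- A's outer 'while len(segment_copy) > 0' loop; fuel = |segments| suffices since
-- every iteration removes at least the head of the copy.
def pvLoopA (segments : List PvSeg) : Nat → List PvSeg → List (List PvSeg) → List (List PvSeg)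
  | 0, _, acc => acc
  | _fuel + 1, [], acc => acc
  | fuel + 1, lineNow :: rest, acc =>
    let align := lineNow.2.2
    let indexNow : Int := ((PySem.List.index? segments lineNow).getD 0 : Nat)
    let copy1 := pvRemove (lineNow :: rest) lineNow
    let st := (PySem.List.enumerate segments).foldl (pvInnerStep align lineNow indexNow) ([lineNow], copy1)
    pvLoopA segments fuel st.2 (acc ++ [st.1])

def find_collinear_lines (segments : List ((Int × Int) × (Int × Int) × String)) : List (List ((Int × Int) × (Int × Int) × String)) :=
  pvLoopA segments segments.length segments []

-- ===== PORT B =====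
def find_collinear_lines_alt (segments : List ((Int × Int) × (Int × Int) × String)) : List (List ((Int × Int) × (Int × Int) × String)) :=
  ((PySem.List.enumerate segments).foldl
    (fun (d : PySem.Dict (String × Int) (List PvSeg)) p =>
      let key : String × Int :=
        if p.2.2.2 == "Horizontal" then ("H", p.2.1.2)
        else if p.2.2.2 == "Vertical" then ("V", p.2.1.1)
        else ("S", p.1)
      d.modify key [] (fun g => g ++ [p.2]))
    PySem.Dict.empty).values

-- ===== PRECONDITION & SPEC =====
def Spec_find_collinear_lines (segments : List ((Int × Int) × (Int × Int) × String)) (out : List (List ((Int × Int) × (Int × Int) × String))) : Prop := out = find_collinear_lines_alt segments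
instance (segments : List ((Int × Int) × (Int × Int) × String)) (out : List (List ((Int × Int) × (Int × Int) × String))) : Decidable (Spec_find_collinear_lines segments out) := by unfold Spec_find_collinear_lines; infer_instance

-- ===== CLAIM (what is proved, stated in full; the proofs are below) =====
def Claim_equal_find_collinear_lines : Prop := ∀ (segments : List ((Int × Int) × (Int × Int) × String)), Dom_find_collinear_lines segments → Spec_find_collinear_lines segments (find_collinear_lines segments)

-- ===== LEMMAS AND PROOFS =====

-- the grouping key of B: value-determined for axis-aligned segments, the index for the rest
def pvKey (p : Int × PvSeg) : String × Int :=
  if p.2.2.2 == "Horizontal" then ("H", p.2.1.2)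
  else if p.2.2.2 == "Vertical" then ("V", p.2.1.1)
  else ("S", p.1)

-- the common closed form both ports are reduced to
def pvCanon (segments : List PvSeg) : List (List PvSeg) :=
  let es := PySem.List.enumerate segments
  (PySem.Set.ofList (es.map pvKey)).map
    (fun k => (es.filter (fun p => pvKey p == k)).map (·.2))

-- L0
theorem pvFilter_ofList {α : Type} [BEq α] [LawfulBEq α] (p : α → Bool) :
    ∀ l : List α, (PySem.Set.ofList l).filter p = PySem.Set.ofList (l.filter p) := by
  intro l
  induction l with
  | nil => rfl
  | cons x l ih =>
    rw [PySem.Set.ofList_cons, PySem.Set.discard]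
    cases hx : p x with
    | true =>
      rw [List.filter_cons_of_pos hx, List.filter_cons_of_pos hx, PySem.Set.ofList_cons,
        PySem.Set.discard, ← ih, List.filter_filter, List.filter_filter]
      congr 1
      apply List.filter_congr
      intro a _
      rw [Bool.and_comm]
    | false =>
      rw [List.filter_cons_of_neg (by simp [hx]), List.filter_cons_of_neg (by simp [hx]),
        List.filter_filter, ← ih]
      apply List.filter_congr
      intro a _
      cases hax : a == x with
      | true => simp_all [eq_of_beq hax]
      | false => simp

theorem pvDiscard_ofList {α : Type} [BEq α] [LawfulBEq α] (l : List α) (x : α) :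
    (PySem.Set.ofList l).discard x = PySem.Set.ofList (l.filter (fun y => !(y == x))) := by
  rw [PySem.Set.discard, pvFilter_ofList]

-- L1
theorem pvRemove_map_snd :
    ∀ (R1 : List (Int × PvSeg)) (m : Int × PvSeg) (R2 : List (Int × PvSeg)) (t : PvSeg),
      (∀ p ∈ R1, p.2 ≠ t) → m.2 = t →
      pvRemove ((R1 ++ m :: R2).map (·.2)) t = (R1 ++ R2).map (·.2) := by
  intro R1
  induction R1 with
  | nil =>
    intro m R2 t _ hm
    simp [pvRemove, hm, PySem.List.remove?_cons_self]
  | cons q R1 ih =>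
    intro m R2 t h hm
    have hq : q.2 ≠ t := h q (by simp)
    have hih := ih m R2 t (fun p hp => h p (by simp [hp])) hm
    simp only [List.map_cons, List.cons_append]
    rw [pvRemove, PySem.List.remove?_cons_of_ne _ hq]
    rw [pvRemove] at hih
    cases hrem : PySem.List.remove? ((R1 ++ m :: R2).map (·.2)) t with
    | none =>
      exfalso
      have hnone := (PySem.List.remove?_eq_none_iff ((R1 ++ m :: R2).map (·.2)) t).mp hrem
      exact hnone (List.mem_map.mpr ⟨m, by simp, hm⟩)
    | some r =>
      rw [hrem] at hih
      simp only [Option.map_some, Option.getD_some] at hih ⊢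
      rw [hih]

-- L2: the generic inner fold
theorem pvInner_fold (mtch : PvSeg → Bool) (j : Int)
    (stepF : List PvSeg × List PvSeg → Int × PvSeg → List PvSeg × List PvSeg)
    (hstep : ∀ st p, stepF st p =
      if p.1 == j then st
      else if mtch p.2 then (st.1 ++ [p.2], pvRemove st.2 p.2) else st) :
    ∀ (ws R : List (Int × PvSeg)) (g : List PvSeg),
      R.filter (fun p => mtch p.2) = ws.filter (fun p => p.1 != j && mtch p.2) →
      ws.foldl stepF (g, R.map (·.2)) =
        (g ++ (ws.filter (fun p => p.1 != j && mtch p.2)).map (·.2),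
         (R.filter (fun p => !mtch p.2)).map (·.2)) := by
  intro ws
  induction ws with
  | nil =>
    intro R g hinv
    simp only [List.filter_nil] at hinv
    have hall : ∀ p ∈ R, mtch p.2 = false := by
      intro p hp
      by_contra hc
      have hmem : p ∈ R.filter (fun p => mtch p.2) :=
        List.mem_filter.mpr ⟨hp, by simpa using hc⟩
      rw [hinv] at hmem
      simp at hmem
    have hfil : R.filter (fun p => !mtch p.2) = R :=
      List.filter_eq_self.mpr (fun p hp => by simp [hall p hp])
    rw [List.foldl_nil, List.filter_nil, List.map_nil, List.append_nil, hfil]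
  | cons q ws ih =>
    intro R g hinv
    rw [List.foldl_cons, hstep]
    cases hjb : q.1 == j with
    | true =>
      have hj : q.1 = j := by simpa using hjb
      rw [if_pos rfl]
      rw [List.filter_cons_of_neg (by simp [hj])] at hinv ⊢
      exact ih R g hinv
    | false =>
      rw [if_neg (by simp)]
      cases hm : mtch q.2 with
      | false =>
        rw [if_neg (by simp)]
        rw [List.filter_cons_of_neg (by simp [hm])] at hinv ⊢
        exact ih R g hinv
      | true =>
        rw [if_pos rfl]
        rw [List.filter_cons_of_pos (by simp [hm]; simpa using hjb)] at hinv ⊢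
        obtain ⟨R1, R2, hR, hR1, hq, hR2⟩ := List.filter_eq_cons_iff.mp hinv
        have hR1v : ∀ p ∈ R1, p.2 ≠ q.2 := by
          intro p hp hpq
          exact hR1 p hp (by simpa [hpq] using hm)
        have hrem : pvRemove (R.map (·.2)) q.2 = (R1 ++ R2).map (·.2) := by
          rw [hR]; exact pvRemove_map_snd R1 q R2 q.2 hR1v rfl
        simp only [hrem]
        have hinv' : (R1 ++ R2).filter (fun p => mtch p.2) =
            ws.filter (fun p => p.1 != j && mtch p.2) := by
          rw [List.filter_append, List.filter_eq_nil_iff.mpr hR1, List.nil_append, hR2]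
        rw [ih (R1 ++ R2) (g ++ [q.2]) hinv']
        have hnot : R.filter (fun p => !mtch p.2) = (R1 ++ R2).filter (fun p => !mtch p.2) := by
          have h1 : R1.filter (fun p => !mtch p.2) = R1 :=
            List.filter_eq_self.mpr (fun p hp => by simpa using hR1 p hp)
          rw [hR, List.filter_append, List.filter_append, h1,
            List.filter_cons_of_neg (by simp [hq])]
        rw [hnot]
        simp [List.append_assoc]

-- L3: specializations of A's inner step
theorem pvInnerStep_horiz (s0 : PvSeg) (j : Int) (h : s0.2.2 = "Horizontal") :
    ∀ st p, pvInnerStep s0.2.2 s0 j st p =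
      if p.1 == j then st
      else if (p.2.2.2 == "Horizontal" && p.2.1.2 == s0.1.2) then
        (st.1 ++ [p.2], pvRemove st.2 p.2)
      else st := by
  intro st p
  cases hA : p.2.2.2 == "Horizontal" <;> cases hC : p.2.1.2 == s0.1.2 <;>
    simp [pvInnerStep, h, hA, hC]

theorem pvInnerStep_vert (s0 : PvSeg) (j : Int) (h : s0.2.2 = "Vertical") :
    ∀ st p, pvInnerStep s0.2.2 s0 j st p =
      if p.1 == j then st
      else if (p.2.2.2 == "Vertical" && p.2.1.1 == s0.1.1) then
        (st.1 ++ [p.2], pvRemove st.2 p.2)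
      else st := by
  intro st p
  cases hA : p.2.2.2 == "Vertical" <;> cases hC : p.2.1.1 == s0.1.1 <;>
    simp [pvInnerStep, h, hA, hC]

theorem pvInnerStep_other (s0 : PvSeg) (j : Int)
    (hH : ¬ s0.2.2 = "Horizontal") (hV : ¬ s0.2.2 = "Vertical") :
    ∀ st p, pvInnerStep s0.2.2 s0 j st p = st := by
  intro st p
  simp [pvInnerStep, hH, hV]

-- L4: the match tests of A are B's key comparisons
theorem pvKey_horiz_match (s0 : PvSeg) (p : Int × PvSeg) :
    (p.2.2.2 == "Horizontal" && p.2.1.2 == s0.1.2) = (pvKey p == ("H", s0.1.2)) := by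
  cases hA : p.2.2.2 == "Horizontal" with
  | true => simp [pvKey, hA]
  | false =>
    by_cases hB : p.2.2.2 = "Vertical" <;> simp [pvKey, hA, hB]

theorem pvKey_vert_match (s0 : PvSeg) (p : Int × PvSeg) :
    (p.2.2.2 == "Vertical" && p.2.1.1 == s0.1.1) = (pvKey p == ("V", s0.1.1)) := by
  by_cases hA : p.2.2.2 = "Horizontal"
  · simp [pvKey, hA]
  · cases hB : p.2.2.2 == "Vertical" <;> simp [pvKey, hA, hB]

theorem pvKey_eq_S (p : Int × PvSeg) (m : Int) :
    (pvKey p == ("S", m)) = true → p.1 = m := by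
  unfold pvKey
  split_ifs <;> simp_all

-- the head of the remaining copy is the first occurrence of its value in segments
theorem pvIndex_first (segments : List PvSeg) (b a : List (Int × PvSeg)) (hd : Int × PvSeg)
    (hsplit : PySem.List.enumerate segments = b ++ hd :: a)
    (hbk : ∀ p ∈ b, (pvKey p == pvKey hd) = false)
    (halt : ∀ p ∈ a, hd.1 < p.1)
    (hvk : ∀ i : Int, pvKey (i, hd.2) = pvKey hd) :
    (((PySem.List.index? segments hd.2).getD 0 : Nat) : Int) = hd.1 := by
  have hdm : hd ∈ PySem.List.enumerate segments := by
    rw [hsplit]; exact List.mem_append.mpr (Or.inr (List.mem_cons_self))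
  obtain ⟨kn, hkn, hhd⟩ := (PySem.List.mem_enumerate_iff segments 0 hd).mp hdm
  have hd1 : hd.1 = (kn : Int) := by rw [hhd]; simp
  have hd2 : hd.2 = segments[kn] := by rw [hhd]
  have hfirst : ∀ i (hi : i < segments.length), i < kn → segments[i] ≠ hd.2 := by
    intro i hi hik heq
    have hpm : ((i : Int), segments[i]) ∈ PySem.List.enumerate segments :=
      (PySem.List.mem_enumerate_iff segments 0 ((i : Int), segments[i])).mpr
        ⟨i, hi, by simp⟩
    rw [hsplit] at hpm
    rcases List.mem_append.mp hpm with hpb | hpc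
    · have := hbk _ hpb
      rw [heq] at this
      rw [hvk (i : Int)] at this
      simp at this
    · rcases List.mem_cons.mp hpc with hpe | hpa
      · have : (i : Int) = hd.1 := by rw [← hpe]
        omega
      · have := halt _ hpa
        simp only at this
        omega
  have hidx : PySem.List.index? segments hd.2 = some kn := by
    rw [PySem.List.index?_eq_some_iff]
    refine ⟨segments.take kn, segments.drop (kn + 1), ?_, ?_, ?_⟩
    · conv_lhs => rw [← List.take_append_drop kn segments]
      rw [List.drop_eq_getElem_cons hkn, ← hd2]
    · exact List.length_take_of_le (le_of_lt hkn)
    · intro hmem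
      obtain ⟨i, hi, hieq⟩ := List.mem_iff_getElem.mp hmem
      have hi' : i < kn ∧ i < segments.length := by simpa using hi
      exact hfirst i hi'.2 hi'.1 (by rw [← hieq]; simp [List.getElem_take])
  rw [hidx, Option.getD_some, hd1]

-- the inner loop of A, run for an axis-aligned head, collects exactly the head's key class
theorem pvAxis_fold (segments : List PvSeg) (b a tl : List (Int × PvSeg)) (hd : Int × PvSeg)
    (mtch : PvSeg → Bool)
    (stepF : List PvSeg × List PvSeg → Int × PvSeg → List PvSeg × List PvSeg)
    (hsplit : PySem.List.enumerate segments = b ++ hd :: a)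
    (hbk : ∀ p ∈ b, (pvKey p == pvKey hd) = false)
    (halt : ∀ p ∈ a, hd.1 < p.1)
    (hmk : ∀ p : Int × PvSeg, mtch p.2 = (pvKey p == pvKey hd))
    (hstep : ∀ st p, stepF st p =
      if p.1 == hd.1 then st
      else if mtch p.2 then (st.1 ++ [p.2], pvRemove st.2 p.2) else st)
    (htlka : tl.filter (fun p => pvKey p == pvKey hd) = a.filter (fun p => pvKey p == pvKey hd)) :
    (PySem.List.enumerate segments).foldl stepF ([hd.2], tl.map (·.2)) =
      (((PySem.List.enumerate segments).filter (fun p => pvKey p == pvKey hd)).map (·.2),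
       (tl.filter (fun p => !(pvKey p == pvKey hd))).map (·.2)) := by
  have hesk : (PySem.List.enumerate segments).filter (fun p => p.1 != hd.1 && mtch p.2)
      = a.filter (fun p => pvKey p == pvKey hd) := by
    rw [hsplit, List.filter_append,
      List.filter_eq_nil_iff.mpr (by
        intro p hp
        simp [hmk p, hbk p hp]),
      List.nil_append,
      List.filter_cons_of_neg (by simp),
      List.filter_congr (by
        intro p hp
        have h1 : (p.1 != hd.1) = true := by simpa using (ne_of_gt (halt p hp))
        rw [h1, hmk p, Bool.true_and])]
  have hinv : tl.filter (fun p => mtch p.2)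
      = (PySem.List.enumerate segments).filter (fun p => p.1 != hd.1 && mtch p.2) := by
    rw [hesk, List.filter_congr (fun p _ => hmk p), htlka]
  rw [pvInner_fold mtch hd.1 stepF hstep (PySem.List.enumerate segments) tl [hd.2] hinv]
  simp only [Prod.mk.injEq]
  refine ⟨?_, ?_⟩
  · rw [hesk]
    have hfk : (PySem.List.enumerate segments).filter (fun p => pvKey p == pvKey hd)
        = hd :: a.filter (fun p => pvKey p == pvKey hd) := by
      rw [hsplit, List.filter_append, List.filter_eq_nil_iff.mpr (by intro p hp; simp [hbk p hp]),
        List.nil_append, List.filter_cons_of_pos (by simp)]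
    rw [hfk]
    simp
  · rw [List.filter_congr (by intro p _; rw [hmk p])]

theorem pvLoop_continue (segments : List PvSeg) (fuel : Nat) (P : (String × Int) → Bool)
    (acc : List (List PvSeg)) (hd : Int × PvSeg) (tl : List (Int × PvSeg))
    (ih : ∀ (P : (String × Int) → Bool) (acc : List (List PvSeg)),
      ((PySem.List.enumerate segments).filter (fun p => P (pvKey p))).length ≤ fuel →
      pvLoopA segments fuel (((PySem.List.enumerate segments).filter (fun p => P (pvKey p))).map (·.2)) acc
        = acc ++ (PySem.Set.ofList (((PySem.List.enumerate segments).filter (fun p => P (pvKey p))).map pvKey)).map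
            (fun k => ((PySem.List.enumerate segments).filter (fun p => pvKey p == k)).map (·.2)))
    (hQ' : (PySem.List.enumerate segments).filter (fun p => P (pvKey p) && !(pvKey p == pvKey hd))
        = tl.filter (fun p => !(pvKey p == pvKey hd)))
    (hlen : tl.length ≤ fuel) :
    pvLoopA segments fuel ((tl.filter (fun p => !(pvKey p == pvKey hd))).map (·.2))
        (acc ++ [((PySem.List.enumerate segments).filter (fun p => pvKey p == pvKey hd)).map (·.2)])
      = acc ++ (PySem.Set.ofList ((hd :: tl).map pvKey)).map
          (fun k => ((PySem.List.enumerate segments).filter (fun p => pvKey p == k)).map (·.2)) := by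
  have hlen' : ((PySem.List.enumerate segments).filter
      (fun p => P (pvKey p) && !(pvKey p == pvKey hd))).length ≤ fuel := by
    rw [hQ']
    exact le_trans (List.length_filter_le _ tl) hlen
  have hkeys : PySem.Set.ofList ((hd :: tl).map pvKey)
      = pvKey hd :: PySem.Set.ofList (((PySem.List.enumerate segments).filter
          (fun p => P (pvKey p) && !(pvKey p == pvKey hd))).map pvKey) := by
    rw [List.map_cons, PySem.Set.ofList_cons, pvDiscard_ofList, hQ', List.filter_map]
    rfl
  have hmain := ih (fun x => P x && !(x == pvKey hd)) (acc ++ [((PySem.List.enumerate segments).filter (fun p => pvKey p == pvKey hd)).map (·.2)]) hlen'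
  rw [hQ'] at hmain
  rw [hmain, hkeys, hQ', List.map_cons, List.append_assoc, List.singleton_append]

theorem pvLoopA_canon (segments : List PvSeg) :
    ∀ (fuel : Nat) (P : (String × Int) → Bool) (acc : List (List PvSeg)),
      ((PySem.List.enumerate segments).filter (fun p => P (pvKey p))).length ≤ fuel →
      pvLoopA segments fuel (((PySem.List.enumerate segments).filter (fun p => P (pvKey p))).map (·.2)) acc
        = acc ++ (PySem.Set.ofList (((PySem.List.enumerate segments).filter (fun p => P (pvKey p))).map pvKey)).map
            (fun k => ((PySem.List.enumerate segments).filter (fun p => pvKey p == k)).map (·.2)) := by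
  intro fuel
  induction fuel with
  | zero =>
    intro P acc hlen
    have hnil : (PySem.List.enumerate segments).filter (fun p => P (pvKey p)) = [] :=
      List.length_eq_zero_iff.mp (Nat.le_zero.mp hlen)
    rw [hnil]
    simp [pvLoopA]
  | succ fuel ih =>
    intro P acc hlen
    cases hf : (PySem.List.enumerate segments).filter (fun p => P (pvKey p)) with
    | nil =>
      simp [pvLoopA]
    | cons hd tl =>
      obtain ⟨b, a, hsplit, hb, hQhd, hfa⟩ := List.filter_eq_cons_iff.mp hf
      have hpw := PySem.List.pairwise_lt_enumerate segments 0
      rw [hsplit] at hpw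
      have hpw2 := List.pairwise_append.mp hpw
      have halt : ∀ p ∈ a, hd.1 < p.1 := (List.pairwise_cons.mp hpw2.2.1).1
      have hbk : ∀ p ∈ b, (pvKey p == pvKey hd) = false := by
        intro p hp
        cases hk : pvKey p == pvKey hd with
        | false => rfl
        | true =>
          exfalso
          exact hb p hp (by rw [eq_of_beq hk]; exact hQhd)
      have hQ' : (PySem.List.enumerate segments).filter (fun p => P (pvKey p) && !(pvKey p == pvKey hd))
          = tl.filter (fun p => !(pvKey p == pvKey hd)) := by
        rw [← hfa, List.filter_filter, hsplit, List.filter_append,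
          List.filter_eq_nil_iff.mpr (fun p hp => by simp [hb p hp]),
          List.nil_append, List.filter_cons_of_neg (by simp),
          List.filter_congr (fun p _ => by rw [Bool.and_comm])]
      have hlentl : tl.length ≤ fuel := by
        have := hlen
        rw [hf] at this
        simpa using this
      have ha_mem_tl : ∀ p ∈ tl, p ∈ a := by
        intro p hp
        rw [← hfa] at hp
        exact List.mem_of_mem_filter hp
      -- unfold one iteration of A's while loop
      rw [List.map_cons, pvLoopA]
      simp only [pvRemove, PySem.List.remove?_cons_self, Option.getD_some]
      by_cases hH : hd.2.2.2 = "Horizontal"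
      · -- horizontal head
        have khd : pvKey hd = ("H", hd.2.1.2) := by
          have : (hd.2.2.2 == "Horizontal") = true := by simpa using hH
          simp [pvKey, this]
        have hmk : ∀ p : Int × PvSeg,
            (p.2.2.2 == "Horizontal" && p.2.1.2 == hd.2.1.2) = (pvKey p == pvKey hd) := by
          intro p
          rw [khd]
          exact pvKey_horiz_match hd.2 p
        have hvk : ∀ i : Int, pvKey (i, hd.2) = pvKey hd := by
          intro i
          rw [khd]
          have : (hd.2.2.2 == "Horizontal") = true := by simpa using hH
          simp [pvKey, this]
        have hidx := pvIndex_first segments b a hd hsplit hbk halt hvk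
        rw [hidx]
        have htlka : tl.filter (fun p => pvKey p == pvKey hd) = a.filter (fun p => pvKey p == pvKey hd) := by
          rw [← hfa, List.filter_filter,
            List.filter_congr (q := fun p => pvKey p == pvKey hd) (fun p _ => by
              cases hk : pvKey p == pvKey hd with
              | false => simp [hk]
              | true => simp only [hk, Bool.true_and]; rw [eq_of_beq hk]; exact hQhd)]
        have hfold := pvAxis_fold segments b a tl hd
          (fun t => t.2.2 == "Horizontal" && t.1.2 == hd.2.1.2)
          (pvInnerStep hd.2.2.2 hd.2 hd.1) hsplit hbk halt hmk
          (pvInnerStep_horiz hd.2 hd.1 hH) htlka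
        rw [hfold]
        exact pvLoop_continue segments fuel P acc hd tl ih hQ' hlentl
      · by_cases hV : hd.2.2.2 = "Vertical"
        · -- vertical head
          have khd : pvKey hd = ("V", hd.2.1.1) := by
            have h1 : (hd.2.2.2 == "Horizontal") = false := by simpa using hH
            have h2 : (hd.2.2.2 == "Vertical") = true := by simpa using hV
            simp [pvKey, h1, h2]
          have hmk : ∀ p : Int × PvSeg,
              (p.2.2.2 == "Vertical" && p.2.1.1 == hd.2.1.1) = (pvKey p == pvKey hd) := by
            intro p
            rw [khd]
            exact pvKey_vert_match hd.2 p
          have hvk : ∀ i : Int, pvKey (i, hd.2) = pvKey hd := by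
            intro i
            rw [khd]
            have h1 : (hd.2.2.2 == "Horizontal") = false := by simpa using hH
            have h2 : (hd.2.2.2 == "Vertical") = true := by simpa using hV
            simp [pvKey, h1, h2]
          have hidx := pvIndex_first segments b a hd hsplit hbk halt hvk
          rw [hidx]
          have htlka : tl.filter (fun p => pvKey p == pvKey hd) = a.filter (fun p => pvKey p == pvKey hd) := by
            rw [← hfa, List.filter_filter,
              List.filter_congr (q := fun p => pvKey p == pvKey hd) (fun p _ => by
                cases hk : pvKey p == pvKey hd with
                | false => simp [hk]
                | true => simp only [hk, Bool.true_and]; rw [eq_of_beq hk]; exact hQhd)]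
          have hfold := pvAxis_fold segments b a tl hd
            (fun t => t.2.2 == "Vertical" && t.1.1 == hd.2.1.1)
            (pvInnerStep hd.2.2.2 hd.2 hd.1) hsplit hbk halt hmk
            (pvInnerStep_vert hd.2 hd.1 hV) htlka
          rw [hfold]
          exact pvLoop_continue segments fuel P acc hd tl ih hQ' hlentl
        · -- non-axis head: its own singleton group
          have khd : pvKey hd = ("S", hd.1) := by
            have h1 : (hd.2.2.2 == "Horizontal") = false := by simpa using hH
            have h2 : (hd.2.2.2 == "Vertical") = false := by simpa using hV
            simp [pvKey, h1, h2]
          have hak : ∀ p ∈ a, (pvKey p == pvKey hd) = false := by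
            intro p hp
            cases hk : pvKey p == pvKey hd with
            | false => rfl
            | true =>
              exfalso
              rw [khd] at hk
              have := pvKey_eq_S p hd.1 hk
              have := halt p hp
              omega
          have hfold : (PySem.List.enumerate segments).foldl
              (pvInnerStep hd.2.2.2 hd.2 ((PySem.List.index? segments hd.2).getD 0 : Nat))
              ([hd.2], tl.map (·.2)) = ([hd.2], tl.map (·.2)) := by
            rw [PySem.List.foldl_congr_mem (PySem.List.enumerate segments) _
              (fun st _ => st) ([hd.2], tl.map (·.2))
              (fun st p _ => pvInnerStep_other hd.2 _ hH hV st p),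
              PySem.List.foldl_ignore]
          rw [hfold]
          have hgrp : [hd.2]
              = ((PySem.List.enumerate segments).filter (fun p => pvKey p == pvKey hd)).map (·.2) := by
            rw [hsplit, List.filter_append,
              List.filter_eq_nil_iff.mpr (fun p hp => by simp [hbk p hp]),
              List.nil_append, List.filter_cons_of_pos (by simp),
              List.filter_eq_nil_iff.mpr (fun p hp => by simp [hak p hp])]
            rfl
          have hcopy : tl.map (·.2)
              = (tl.filter (fun p => !(pvKey p == pvKey hd))).map (·.2) := by
            rw [List.filter_eq_self.mpr (fun p hp => by simp [hak p (ha_mem_tl p hp)])]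
          rw [hgrp, hcopy]
          exact pvLoop_continue segments fuel P acc hd tl ih hQ' hlentl

theorem pvB_eq_canon (segments : List PvSeg) :
    find_collinear_lines_alt segments = pvCanon segments := by
  unfold find_collinear_lines_alt pvCanon
  set es := PySem.List.enumerate segments with hes
  have hfold : es.foldl
      (fun (d : PySem.Dict (String × Int) (List PvSeg)) p =>
        let key : String × Int :=
          if p.2.2.2 == "Horizontal" then ("H", p.2.1.2)
          else if p.2.2.2 == "Vertical" then ("V", p.2.1.1)
          else ("S", p.1)
        d.modify key [] (fun g => g ++ [p.2]))
      PySem.Dict.empty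
      = (es.map (fun p => (pvKey p, p.2))).foldl
          (fun d q => d.modify q.1 [] (fun g => g ++ [q.2])) PySem.Dict.empty := by
    rw [List.foldl_map]; rfl
  rw [hfold]
  have hnd : ((es.map (fun p => (pvKey p, p.2))).foldl
      (fun d q => d.modify q.1 [] (fun g => g ++ [q.2])) PySem.Dict.empty).keys.Nodup := by
    rw [List.foldl_map]
    exact PySem.Dict.nodup_keys_foldl_modify_key es (fun p => pvKey p) [] (fun _ p => fun g => g ++ [p.2]) PySem.Dict.empty (by simp [PySem.Dict.empty, PySem.Dict.keys])
  rw [PySem.Dict.values_eq_map_keys _ hnd []]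
  have hkeys : ((es.map (fun p => (pvKey p, p.2))).foldl
      (fun d q => d.modify q.1 [] (fun g => g ++ [q.2])) PySem.Dict.empty).keys
      = PySem.Set.ofList (es.map pvKey) := by
    rw [List.foldl_map]
    rw [PySem.Dict.keys_foldl_modify_key es (fun p => pvKey p) [] (fun _ p => fun g => g ++ [p.2]) PySem.Dict.empty]
    simp [PySem.Dict.empty, PySem.Dict.keys, PySem.Set.update_nil_left]
  rw [hkeys]
  apply List.map_congr_left
  intro k hk
  rw [PySem.Dict.getD_foldl_modify_append]
  simp [PySem.Dict.empty, PySem.Dict.getD, PySem.Dict.get?, List.filter_map, Function.comp_def]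

theorem pvA_eq_canon (segments : List PvSeg) :
    find_collinear_lines segments = pvCanon segments := by
  have h := pvLoopA_canon segments segments.length (fun _ => true) []
  simp only [List.filter_true] at h
  rw [PySem.List.map_snd_enumerate] at h
  unfold find_collinear_lines pvCanon
  rw [h (le_of_eq (PySem.List.length_enumerate segments 0)), List.nil_append]

-- ===== VERDICT (by name: the statement is the Claim_ definition above) =====
theorem find_collinear_lines_spec : Claim_equal_find_collinear_lines := by
  intro segments _
  unfold Spec_find_collinear_lines
  rw [pvA_eq_canon, pvB_eq_canon]
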